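-- pv_equiv track=rewrite | github.com/matthewsmawfield/TEP-SLR | scripts/steps/step_2_1_slr_residuals.py | select_slrf2020_sinex_filename
-- ===== SOURCE A (Python) =====
-- from typing import Dict, Iterable, List, Optional, Tuple
--
-- def select_slrf2020_sinex_filename(files: List[str]) -> Optional[str]:
--     """Pick the best SLRF2020 SINEX filename from a CDDIS directory listing."""
--     sinex = [f for f in files if f.lower().endswith((".snx", ".snx.gz"))]
--     if not sinex:
--         return None
--
--     # Prefer explicit SLRF2020 products over generic ILRS data handling files.
--     slrf = [f for f in sinex if "slrf2020" in f.lower()]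
--     if slrf:
--         return sorted(slrf)[-1]
--
--     # Fallback: some archives may use different casing or naming; keep a conservative fallback.
--     slrf_like = [f for f in sinex if "slrf" in f.lower() and "2020" in f.lower()]
--     if slrf_like:
--         return sorted(slrf_like)[-1]
--
--     return None
-- ===== SOURCE B (Python) =====
-- def select_slrf2020_sinex_filename(files):
--     """Pick the best SLRF2020 SINEX filename from a CDDIS directory listing."""
--     best = None       # lexicographically largest explicit SLRF2020 product
--     best_like = None  # lexicographically largest slrf+2020 fallback
--     for f in files:
--         n = f.lower()
--         if not (n.endswith(".snx") or n.endswith(".snx.gz")):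
--             continue
--         if "slrf2020" in n:
--             if best is None or best < f:
--                 best = f
--         elif "slrf" in n and "2020" in n:
--             if best_like is None or best_like < f:
--                 best_like = f
--     return best if best is not None else best_like
-- ===== Notes on version B (the rewrite author's own statement) =====
-- stated objective: alternative
-- what changed: Replaces the four list comprehensions plus two full sorts with a single pass over the listing that keeps two running lexicographic maxima (explicit SLRF2020 vs slrf+2020 fallback) and never builds or sorts intermediate lists.
import Mathlib
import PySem

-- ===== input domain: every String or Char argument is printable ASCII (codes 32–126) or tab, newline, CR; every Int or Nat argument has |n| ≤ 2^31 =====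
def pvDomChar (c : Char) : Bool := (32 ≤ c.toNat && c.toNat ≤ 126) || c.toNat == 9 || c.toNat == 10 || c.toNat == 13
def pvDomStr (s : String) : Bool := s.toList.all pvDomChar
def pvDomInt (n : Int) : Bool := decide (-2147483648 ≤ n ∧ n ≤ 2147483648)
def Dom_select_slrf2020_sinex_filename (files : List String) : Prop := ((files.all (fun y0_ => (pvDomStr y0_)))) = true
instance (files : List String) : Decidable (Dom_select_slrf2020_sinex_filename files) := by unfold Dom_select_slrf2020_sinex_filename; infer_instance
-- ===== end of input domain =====

-- B replaces A's filter-lists-and-sort pipeline by a single pass keeping two running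
-- lexicographic maxima (no intermediate lists, no sorting); same return value, proved equal.

-- ===== PORT A =====
def select_slrf2020_sinex_filename (files : List String) : Option String :=
  let sinex := files.filter (fun f =>
    PySem.Str.endswith (PySem.Str.lower f) ".snx" || PySem.Str.endswith (PySem.Str.lower f) ".snx.gz")
  if sinex = [] then none
  else
    let slrf := sinex.filter (fun f => PySem.Str.isIn "slrf2020" (PySem.Str.lower f))
    if slrf ≠ [] then PySem.List.pyGet? (PySem.List.sorted slrf (fun x => x) false) (-1)
    else
      let slrf_like := sinex.filter (fun f =>
        PySem.Str.isIn "slrf" (PySem.Str.lower f) && PySem.Str.isIn "2020" (PySem.Str.lower f))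
      if slrf_like ≠ [] then PySem.List.pyGet? (PySem.List.sorted slrf_like (fun x => x) false) (-1)
      else none

-- ===== PORT B =====
-- running maximum update: 'if best is None or best < f: best = f'
def pvUpdMax (acc : Option String) (f : String) : Option String :=
  match acc with
  | none => some f
  | some b => if b < f then some f else acc

-- loop body of B's single pass (two accumulators: explicit SLRF2020 max, slrf+2020 fallback max)
def pvStepB (st : Option String × Option String) (f : String) : Option String × Option String :=
  let n := PySem.Str.lower f
  if !(PySem.Str.endswith n ".snx" || PySem.Str.endswith n ".snx.gz") then st
  else if PySem.Str.isIn "slrf2020" n then (pvUpdMax st.1 f, st.2)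
  else if PySem.Str.isIn "slrf" n && PySem.Str.isIn "2020" n then (st.1, pvUpdMax st.2 f)
  else st

def select_slrf2020_sinex_filename_alt (files : List String) : Option String :=
  let st := files.foldl pvStepB (none, none)
  match st.1 with
  | some b => some b
  | none => st.2

-- ===== PRECONDITION & SPEC =====
def Spec_select_slrf2020_sinex_filename (files : List String) (out : Option String) : Prop := out = select_slrf2020_sinex_filename_alt files
instance (files : List String) (out : Option String) : Decidable (Spec_select_slrf2020_sinex_filename files out) := by unfold Spec_select_slrf2020_sinex_filename; infer_instance

-- ===== CLAIM (what is proved, stated in full; the proofs are below) =====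
def Claim_equal_select_slrf2020_sinex_filename : Prop := ∀ (files : List String), Dom_select_slrf2020_sinex_filename files → Spec_select_slrf2020_sinex_filename files (select_slrf2020_sinex_filename files)

-- ===== LEMMAS AND PROOFS =====

-- predicates naming the three filters involved
def pvSx (f : String) : Bool :=
  PySem.Str.endswith (PySem.Str.lower f) ".snx" || PySem.Str.endswith (PySem.Str.lower f) ".snx.gz"
def pvP2 (f : String) : Bool := PySem.Str.isIn "slrf2020" (PySem.Str.lower f) && pvSx f
def pvP1 (f : String) : Bool :=
  (!PySem.Str.isIn "slrf2020" (PySem.Str.lower f)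
    && (PySem.Str.isIn "slrf" (PySem.Str.lower f) && PySem.Str.isIn "2020" (PySem.Str.lower f)))
    && pvSx f

-- B's single pass is two independent running maxima over the two filtered sublists
lemma pvStepB_split (l : List String) : ∀ (st : Option String × Option String),
    l.foldl pvStepB st
      = (List.foldl pvUpdMax st.1 (l.filter pvP2), List.foldl pvUpdMax st.2 (l.filter pvP1)) := by
  induction l with
  | nil => intro st; simp
  | cons x t ih =>
    intro st
    simp only [List.foldl_cons, List.filter_cons, ih]
    by_cases ha : PySem.Str.endswith (PySem.Str.lower x) ".snx" = true <;>
      by_cases hb : PySem.Str.endswith (PySem.Str.lower x) ".snx.gz" = true <;>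
      by_cases h2 : PySem.Str.isIn "slrf2020" (PySem.Str.lower x) = true <;>
      by_cases hc : PySem.Str.isIn "slrf" (PySem.Str.lower x) = true <;>
      by_cases hd : PySem.Str.isIn "2020" (PySem.Str.lower x) = true <;>
      simp_all [pvStepB, pvP2, pvP1, pvSx]

-- the running maximum computes foldl max
lemma pvFoldUpd_some (l : List String) : ∀ (a : String),
    List.foldl pvUpdMax (some a) l = some (l.foldl max a) := by
  induction l with
  | nil => intro a; simp
  | cons x t ih =>
    intro a
    have h : pvUpdMax (some a) x = some (max a x) := by
      unfold pvUpdMax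
      by_cases h : a < x
      · simp [h, max_eq_right h.le]
      · simp [h, max_eq_left (not_lt.mp h)]
    simp only [List.foldl_cons, h, ih]

lemma pvFoldUpd_none (x : String) (t : List String) :
    List.foldl pvUpdMax none (x :: t) = some (t.foldl max x) := by
  have h : pvUpdMax none x = some x := rfl
  simp only [List.foldl_cons, h, pvFoldUpd_some]

-- sorted(l)[-1] on a nonempty list is the maximum
lemma pvSortedLast (x : String) (t : List String) :
    PySem.List.pyGet? (PySem.List.sorted (x :: t) (fun y => y) false) (-1)
      = some (t.foldl max x) := by
  set s := PySem.List.sorted (x :: t) (fun y => y) false with hs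
  have hlen : s.length = t.length + 1 := by
    rw [hs, PySem.List.length_sorted]; simp
  have hget : PySem.List.pyGet? s (-1) = some (s[s.length - 1]'(by omega)) := by
    simp only [PySem.List.pyGet?, PySem.List.pyIdx?]
    have h1 : ¬ (0:Int) ≤ -1 := by omega
    have h2 : -(s.length : Int) ≤ -1 := by omega
    simp [h2, List.getElem?_eq_getElem (by omega : s.length - 1 < s.length)]
  rw [hget]
  congr 1
  -- both sides are maxima of x :: t; equal by antisymmetry
  have hm : PySem.List.max? (x :: t) (fun y => y) = some (t.foldl max x) :=
    PySem.List.max?_id_cons x t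
  have hub : ∀ y ∈ (x :: t), y ≤ t.foldl max x := PySem.List.max?_isMax hm
  have hmem_s : t.foldl max x ∈ s := by
    rw [hs, PySem.List.mem_sorted]; exact PySem.List.max?_mem hm
  obtain ⟨i, hi, hie⟩ := List.mem_iff_getElem.mp hmem_s
  have hle1 : s[s.length - 1]'(by omega) ≤ t.foldl max x := by
    apply hub
    rw [← PySem.List.mem_sorted (x :: t) (fun y => y) false, ← hs]
    exact List.getElem_mem _
  have hq : s.length - 1 < (PySem.List.sorted (x :: t) (fun y => y) false).length := by
    rw [← hs]; omega
  have hmono := PySem.List.key_sorted_getElem_mono (xs := x :: t) (key := fun y => y)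
    (show i ≤ s.length - 1 by omega) hq
  have hle2 : t.foldl max x ≤ s[s.length - 1]'(by omega) := by
    rw [← hie]
    simpa using hmono
  exact le_antisymm hle1 hle2

lemma pvFilterP2 (files : List String) :
    (files.filter (fun f => PySem.Str.endswith (PySem.Str.lower f) ".snx"
        || PySem.Str.endswith (PySem.Str.lower f) ".snx.gz")).filter
      (fun f => PySem.Str.isIn "slrf2020" (PySem.Str.lower f)) = files.filter pvP2 := by
  rw [List.filter_filter]
  apply List.filter_congr
  intro f _
  unfold pvP2 pvSx
  rfl

lemma pvFilterP1 (files : List String) (h : files.filter pvP2 = []) :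
    (files.filter (fun f => PySem.Str.endswith (PySem.Str.lower f) ".snx"
        || PySem.Str.endswith (PySem.Str.lower f) ".snx.gz")).filter
      (fun f => PySem.Str.isIn "slrf" (PySem.Str.lower f)
        && PySem.Str.isIn "2020" (PySem.Str.lower f)) = files.filter pvP1 := by
  rw [List.filter_filter]
  apply List.filter_congr
  intro f hf
  have hp2 : pvP2 f = false := by
    rw [List.filter_eq_nil_iff] at h
    simpa using h f hf
  simp only [pvP2, pvSx] at hp2
  simp only [pvP1, pvSx]
  cases he : (PySem.Str.endswith (PySem.Str.lower f) ".snx"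
      || PySem.Str.endswith (PySem.Str.lower f) ".snx.gz") <;>
    cases hi : PySem.Str.isIn "slrf2020" (PySem.Str.lower f) <;> simp_all

lemma pvSinexEmpty (files : List String)
    (h : files.filter (fun f => PySem.Str.endswith (PySem.Str.lower f) ".snx"
        || PySem.Str.endswith (PySem.Str.lower f) ".snx.gz") = []) :
    files.filter pvP2 = [] ∧ files.filter pvP1 = [] := by
  rw [List.filter_eq_nil_iff] at h
  constructor
  all_goals
    rw [List.filter_eq_nil_iff]
    intro f hf
    have hh := h f hf
    simp_all [pvP2, pvP1, pvSx]

-- ===== VERDICT (by name: the statement is the Claim_ definition above) =====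
theorem select_slrf2020_sinex_filename_spec : Claim_equal_select_slrf2020_sinex_filename := by
  intro files _
  unfold Spec_select_slrf2020_sinex_filename
  unfold select_slrf2020_sinex_filename select_slrf2020_sinex_filename_alt
  rw [pvStepB_split]
  simp only
  by_cases hsx : files.filter (fun f => PySem.Str.endswith (PySem.Str.lower f) ".snx"
      || PySem.Str.endswith (PySem.Str.lower f) ".snx.gz") = []
  · obtain ⟨h2, h1⟩ := pvSinexEmpty files hsx
    rw [if_pos hsx, h2, h1]
    rfl
  · rw [if_neg hsx, pvFilterP2 files]
    by_cases h2 : files.filter pvP2 = []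
    · rw [h2, if_neg (by simp), pvFilterP1 files h2]
      by_cases h1 : files.filter pvP1 = []
      · rw [h1, if_neg (by simp)]
        rfl
      · obtain ⟨y, u, hyu⟩ := List.exists_cons_of_ne_nil h1
        rw [hyu, if_pos (List.cons_ne_nil y u), pvSortedLast y u, pvFoldUpd_none y u]
        rfl
    · obtain ⟨y, u, hyu⟩ := List.exists_cons_of_ne_nil h2
      rw [hyu, if_pos (List.cons_ne_nil y u), pvSortedLast y u, pvFoldUpd_none y u]
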